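-- pv_equiv track=rewrite | github.com/stevenbertolucci/radar | main.py | format_paragraph_with_max_words_per_line
-- ===== SOURCE A (Python) =====
-- def format_paragraph_with_max_words_per_line(paragraph, max_words_per_line=12):
--     """
--     Function to format a paragraph with a maximum number of 12 words per line.
--     """
--
--     words = paragraph.split()
--     lines = []
--     current_line = []
--
--     for word in words:
--         current_line.append(word)
--         if len(current_line) >= max_words_per_line:
--             lines.append(" ".join(current_line))
--             current_line = []
--
--     if current_line:
--         lines.append(" ".join(current_line))
--
--     return "\n".join(lines)
-- ===== SOURCE B (Python) =====
-- def format_paragraph_with_max_words_per_line(paragraph, max_words_per_line=12):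
--     # Chunk the word list by slicing instead of an accumulate-and-flush loop.
--     # A non-positive limit makes the original flush after every word, i.e. step 1.
--     step = max_words_per_line if max_words_per_line > 0 else 1
--     words = paragraph.split()
--     lines = []
--     while words:
--         lines.append(" ".join(words[:step]))
--         words = words[step:]
--     return "\n".join(lines)
-- ===== Notes on version B (the rewrite author's own statement) =====
-- stated objective: alternative
-- what changed: Replaces the word-by-word accumulator-and-flush loop with a slicing loop that joins chunks of `step` words at a time (step = 1 for non-positive limits, where A flushes every word).
import Mathlib
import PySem

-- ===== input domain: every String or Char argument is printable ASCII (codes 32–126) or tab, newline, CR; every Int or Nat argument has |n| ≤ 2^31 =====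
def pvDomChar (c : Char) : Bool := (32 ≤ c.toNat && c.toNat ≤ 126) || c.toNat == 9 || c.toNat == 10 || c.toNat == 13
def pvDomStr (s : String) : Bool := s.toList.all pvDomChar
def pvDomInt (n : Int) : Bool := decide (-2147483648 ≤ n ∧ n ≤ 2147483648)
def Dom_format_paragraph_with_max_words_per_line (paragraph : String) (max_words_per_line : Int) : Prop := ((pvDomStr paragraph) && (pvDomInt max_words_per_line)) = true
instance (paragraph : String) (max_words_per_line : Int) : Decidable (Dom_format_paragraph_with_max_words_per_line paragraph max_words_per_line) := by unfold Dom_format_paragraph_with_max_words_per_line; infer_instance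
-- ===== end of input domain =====

-- B replaces A's accumulate-and-flush word loop with slicing the word list into chunks of `step` words (alternative decomposition, same cost).


-- ===== PORT A =====
def format_paragraph_with_max_words_per_line (paragraph : String) (max_words_per_line : Int) : String :=
  let words := PySem.Str.split₀ paragraph
  let st := words.foldl (fun (st : List String × List String) word =>
      let current_line := st.2 ++ [word]
      if max_words_per_line ≤ (current_line.length : Int) then
        (st.1 ++ [PySem.Str.join " " current_line], [])
      else
        (st.1, current_line)) ([], [])
  let lines := if st.2 ≠ [] then st.1 ++ [PySem.Str.join " " st.2] else st.1
  PySem.Str.join "\n" lines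

-- ===== PORT B =====
-- the while loop of Source B: each pass emits " ".join(words[:step]) and continues on words[step:];
-- `s` is step - 1 (step ≥ 1 always), so take/drop use s+1 and termination is evident
def pvChunkLoop (s : Nat) : List String → List String
  | [] => []
  | w :: ws =>
      PySem.Str.join " " (List.take (s+1) (w :: ws)) :: pvChunkLoop s (List.drop (s+1) (w :: ws))
termination_by l => l.length
decreasing_by simp

def format_paragraph_with_max_words_per_line_alt (paragraph : String) (max_words_per_line : Int) : String :=
  let step : Nat := if 0 < max_words_per_line then max_words_per_line.toNat else 1
  let words := PySem.Str.split₀ paragraph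
  PySem.Str.join "\n" (pvChunkLoop (step - 1) words)

-- ===== PRECONDITION & SPEC =====
def Spec_format_paragraph_with_max_words_per_line (paragraph : String) (max_words_per_line : Int) (out : String) : Prop := out = format_paragraph_with_max_words_per_line_alt paragraph max_words_per_line
instance (paragraph : String) (max_words_per_line : Int) (out : String) : Decidable (Spec_format_paragraph_with_max_words_per_line paragraph max_words_per_line out) := by unfold Spec_format_paragraph_with_max_words_per_line; infer_instance

-- ===== CLAIM (what is proved, stated in full; the proofs are below) =====
def Claim_equal_format_paragraph_with_max_words_per_line : Prop := ∀ (paragraph : String) (max_words_per_line : Int), Dom_format_paragraph_with_max_words_per_line paragraph max_words_per_line → Spec_format_paragraph_with_max_words_per_line paragraph max_words_per_line (format_paragraph_with_max_words_per_line paragraph max_words_per_line)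

-- ===== LEMMAS AND PROOFS =====

-- peeling one full chunk off pvChunkLoop
lemma pvChunkLoop_full (s : Nat) (c rest : List String) (hc : c.length = s + 1) :
    pvChunkLoop s (c ++ rest) = PySem.Str.join " " c :: pvChunkLoop s rest := by
  cases c with
  | nil => simp at hc
  | cons w ws =>
    rw [List.cons_append, pvChunkLoop.eq_2]
    rw [← List.cons_append, List.take_append_of_le_length (by omega), List.drop_append_of_le_length (by omega)]
    simp only [List.length_cons] at hc
    rw [List.take_of_length_le (by simp; omega), List.drop_eq_nil_of_le (by simp; omega), List.nil_append]

-- A's loop from state (lines, cur) with cur not yet full equals lines ++ chunks of (cur ++ ws)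
lemma pvLoop_eq (m : Int) (s : Nat)
    (hcond : ∀ k : Nat, 1 ≤ k → (m ≤ (k : Int) ↔ s + 1 ≤ k)) :
    ∀ (ws lines cur : List String), cur.length ≤ s →
      (let st := ws.foldl (fun (st : List String × List String) word =>
          let current_line := st.2 ++ [word]
          if m ≤ (current_line.length : Int) then
            (st.1 ++ [PySem.Str.join " " current_line], [])
          else
            (st.1, current_line)) (lines, cur)
       if st.2 ≠ [] then st.1 ++ [PySem.Str.join " " st.2] else st.1)
      = lines ++ pvChunkLoop s (cur ++ ws) := by
  intro ws
  induction ws with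
  | nil =>
    intro lines cur hcur
    cases cur with
    | nil => simp [pvChunkLoop.eq_1]
    | cons w c =>
      simp only [List.foldl_nil, List.append_nil]
      rw [if_pos (by simp), pvChunkLoop.eq_2]
      have h1 : (w :: c).length ≤ s + 1 := by simpa using Nat.le_succ_of_le hcur
      rw [List.take_of_length_le h1, List.drop_eq_nil_of_le h1]
      simp [pvChunkLoop.eq_1]
  | cons w ws ih =>
    intro lines cur hcur
    simp only [List.foldl_cons]
    by_cases hm : m ≤ ((cur ++ [w]).length : Int)
    · rw [if_pos hm]
      have hlen : (cur ++ [w]).length = s + 1 := by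
        have := (hcond (cur ++ [w]).length (by simp)).mp hm
        simp at this ⊢; omega
      rw [ih (lines ++ [PySem.Str.join " " (cur ++ [w])]) [] (by simp)]
      have : cur ++ w :: ws = (cur ++ [w]) ++ ws := by simp
      rw [this, pvChunkLoop_full s (cur ++ [w]) ws hlen]
      simp
    · rw [if_neg hm]
      have hlen : (cur ++ [w]).length ≤ s := by
        have := fun h => hm ((hcond (cur ++ [w]).length (by simp)).mpr h)
        simp at this ⊢; omega
      rw [ih lines (cur ++ [w]) hlen]
      simp

-- ===== VERDICT (by name: the statement is the Claim_ definition above) =====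
theorem format_paragraph_with_max_words_per_line_spec : Claim_equal_format_paragraph_with_max_words_per_line := by
  intro paragraph m _
  unfold Spec_format_paragraph_with_max_words_per_line
  unfold format_paragraph_with_max_words_per_line format_paragraph_with_max_words_per_line_alt
  simp only []
  set step : Nat := if 0 < m then m.toNat else 1 with hstep
  have hs1 : 1 ≤ step := by by_cases h : 0 < m <;> simp [hstep, h] <;> omega
  have hcond : ∀ k : Nat, 1 ≤ k → (m ≤ (k : Int) ↔ (step - 1) + 1 ≤ k) := by
    intro k hk
    by_cases h : 0 < m <;> simp [hstep, h] <;> omega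
  have := pvLoop_eq m (step - 1) hcond (PySem.Str.split₀ paragraph) [] [] (by simp)
  simp only [List.nil_append] at this
  rw [this]
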